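-- pv_equiv track=rewrite | github.com/andypymont/adventofcode | 2017/day04.py | valid_passphrase
-- ===== SOURCE A (Python) =====
-- from typing import Sequence
--
-- def sort_word(word: str) -> str:
--     return ''.join(char for char in sorted(word))
--
-- def valid_passphrase(words: Sequence[str], check_anagrams: bool = False) -> bool:
--     seen = set()
--     for word in words:
--         word = sort_word(word) if check_anagrams else word
--         if word in seen:
--             return False
--         seen.add(word)
--     return True
-- ===== SOURCE B (Python) =====
-- def sort_word(word: str) -> str:
--     return ''.join(char for char in sorted(word))
--
-- def valid_passphrase(words, check_anagrams=False):
--     processed = sorted(sort_word(w) if check_anagrams else w for w in words)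
--     return all(a != b for a, b in zip(processed, processed[1:]))
-- ===== Notes on version B (the rewrite author's own statement) =====
-- stated objective: alternative
-- what changed: Replaces A's hash-set membership loop with early return by sort-then-scan: sort the (optionally anagram-normalized) words and check that no two adjacent entries are equal.
import Mathlib
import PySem

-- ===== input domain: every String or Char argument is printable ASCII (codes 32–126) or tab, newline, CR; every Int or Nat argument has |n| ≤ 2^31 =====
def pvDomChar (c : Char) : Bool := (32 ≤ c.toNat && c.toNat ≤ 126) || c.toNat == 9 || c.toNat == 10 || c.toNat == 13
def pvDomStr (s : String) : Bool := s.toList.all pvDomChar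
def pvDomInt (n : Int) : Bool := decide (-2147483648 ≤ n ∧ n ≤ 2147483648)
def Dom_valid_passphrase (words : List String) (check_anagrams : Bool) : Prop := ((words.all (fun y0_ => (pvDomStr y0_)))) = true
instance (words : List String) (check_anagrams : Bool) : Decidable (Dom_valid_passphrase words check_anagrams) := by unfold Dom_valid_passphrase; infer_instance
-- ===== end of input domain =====

-- B replaces A's seen-set loop (hash membership + early return) with sort-then-scan:
-- sort the processed words and check that no two adjacent entries are equal (alternative algorithm).

-- ===== PORT A =====
-- ''.join(char for char in sorted(word)) : joining single chars with '' is String.mk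
def sort_word (word : String) : String :=
  String.ofList (PySem.List.sorted word.toList (fun c => c) false)

def validLoop (ws : List String) (check_anagrams : Bool) (seen : PySem.Set String) : Bool :=
  match ws with
  | [] => true
  | word :: rest =>
    let w := if check_anagrams then sort_word word else word
    if PySem.Set.contains seen w then false
    else validLoop rest check_anagrams (PySem.Set.add seen w)

def valid_passphrase (words : List String) (check_anagrams : Bool) : Bool :=
  validLoop words check_anagrams PySem.Set.empty

-- ===== PORT B =====
def valid_passphrase_alt (words : List String) (check_anagrams : Bool) : Bool :=
  let processed := PySem.List.sorted
    (words.map (fun w => if check_anagrams then sort_word w else w)) (fun x => x) false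
  -- zip(processed, processed[1:]) ; all(a != b …)
  (processed.zip (PySem.List.slice processed (some 1) none)).all (fun p => p.1 != p.2)

-- ===== PRECONDITION & SPEC =====
def Spec_valid_passphrase (words : List String) (check_anagrams : Bool) (out : Bool) : Prop := out = valid_passphrase_alt words check_anagrams
instance (words : List String) (check_anagrams : Bool) (out : Bool) : Decidable (Spec_valid_passphrase words check_anagrams out) := by unfold Spec_valid_passphrase; infer_instance

-- ===== CLAIM (what is proved, stated in full; the proofs are below) =====
def Claim_equal_valid_passphrase : Prop := ∀ (words : List String) (check_anagrams : Bool), Dom_valid_passphrase words check_anagrams → Spec_valid_passphrase words check_anagrams (valid_passphrase words check_anagrams)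

-- ===== LEMMAS AND PROOFS =====

-- A's loop succeeds iff the processed words are distinct and none is already in `seen`.
theorem validLoop_eq_true_iff (ca : Bool) (ws : List String) (seen : PySem.Set String) :
    validLoop ws ca seen = true ↔
      ((ws.map (fun w => if ca then sort_word w else w)).Nodup ∧
        ∀ x ∈ ws.map (fun w => if ca then sort_word w else w), x ∉ seen) := by
  induction ws generalizing seen with
  | nil => simp [validLoop]
  | cons w ws ih =>
    set f : String → String := fun w => if ca then sort_word w else w with hf
    simp only [validLoop, List.map_cons, List.nodup_cons]
    by_cases h : f w ∈ seen
    · have hc : PySem.Set.contains seen (f w) = true := by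
        simpa [PySem.Set.contains] using h
      simp only [hf] at hc ⊢
      rw [hc]
      simp only [if_true]
      constructor
      · intro h'; exact absurd h' (by simp)
      · rintro ⟨-, hall⟩
        exact absurd h (hall _ (by simp [hf]))
    · have hc : PySem.Set.contains seen (f w) = false := by
        simpa [PySem.Set.contains] using h
      simp only [hf] at hc ⊢
      rw [hc]
      simp only [Bool.false_eq_true, if_false, ih]
      constructor
      · rintro ⟨hn, hmem⟩
        refine ⟨⟨fun hw => (hmem _ hw) (by simp [PySem.Set.mem_add]), hn⟩, ?_⟩
        intro x hx
        rcases List.mem_cons.1 hx with rfl | hx'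
        · exact h
        · intro hxs
          exact (hmem _ hx') (by simp [PySem.Set.mem_add, hxs])
      · rintro ⟨⟨hw, hn⟩, hmem⟩
        refine ⟨hn, fun x hx hxadd => ?_⟩
        rcases (PySem.Set.mem_add _ _ _).1 hxadd with h1 | rfl
        · exact hmem x (List.mem_cons_of_mem _ hx) h1
        · exact hw hx

-- the adjacent-pair scan of B = "no two adjacent entries equal"
theorem zip_tail_all_ne_iff (l : List String) :
    ((l.zip l.tail).all (fun p => p.1 != p.2) = true) ↔ l.IsChain (· ≠ ·) := by
  induction l with
  | nil => simp
  | cons a l ih =>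
    cases l with
    | nil => simp
    | cons b l =>
      simp only [List.tail_cons, List.zip_cons_cons, List.all_cons, Bool.and_eq_true,
        List.isChain_cons_cons, bne_iff_ne, ne_eq]
      exact and_congr Iff.rfl ih

theorem isChain_lt_of_le_ne (l : List String)
    (hle : l.IsChain (· ≤ ·)) (hne : l.IsChain (· ≠ ·)) : l.IsChain (· < ·) := by
  induction l with
  | nil => exact .nil
  | cons a l ih =>
    cases l with
    | nil => exact List.IsChain.singleton a
    | cons b l =>
      rw [List.isChain_cons_cons] at *
      exact ⟨lt_of_le_of_ne hle.1 hne.1, ih hle.2 hne.2⟩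

-- on a ≤-sorted list, "no two adjacent entries equal" ↔ Nodup
theorem isChain_ne_iff_nodup_of_sorted (l : List String)
    (hs : l.Pairwise (fun a b => a ≤ b)) :
    l.IsChain (· ≠ ·) ↔ l.Nodup := by
  constructor
  · intro hc
    have hlt := isChain_lt_of_le_ne l hs.isChain hc
    exact (List.IsChain.pairwise hlt).imp ne_of_lt
  · exact fun hn => hn.isChain

-- ===== VERDICT (by name: the statement is the Claim_ definition above) =====
theorem valid_passphrase_spec : Claim_equal_valid_passphrase := by
  intro words ca _
  unfold Spec_valid_passphrase valid_passphrase valid_passphrase_alt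
  simp only [PySem.List.slice_from_one]
  set processed := words.map (fun w => if ca then sort_word w else w) with hp
  set s := PySem.List.sorted processed (fun x => x) false with hs
  have hperm : s.Perm processed := PySem.List.sorted_perm ..
  have hpw : s.Pairwise (fun a b => a ≤ b) := PySem.List.sorted_pairwise ..
  have hA : validLoop words ca PySem.Set.empty = true ↔ processed.Nodup := by
    rw [validLoop_eq_true_iff]
    simp [PySem.Set.empty, hp]
  have hB : ((s.zip s.tail).all (fun p => p.1 != p.2) = true) ↔ processed.Nodup := by
    rw [zip_tail_all_ne_iff, isChain_ne_iff_nodup_of_sorted s hpw, hperm.nodup_iff]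
  rw [Bool.eq_iff_iff, hA, hB]
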